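-- pv_equiv track=rewrite | github.com/chikbob/LR_PDTU | LR7/LR7_7.py | sortAndCountUnique
-- ===== SOURCE A (Python) =====
-- def sortAndCountUnique(arr):
--     n = len(arr)
--     for i in range(n):
--         for j in range(0, n - i - 1):
--             if arr[j] > arr[j + 1]:
--                 arr[j], arr[j + 1] = arr[j + 1], arr[j]
--
--     uniqueCount = 1
--
--     for i in range(1, n):
--         is_unique = True
--         for j in range(0, i):
--             if arr[i] == arr[j]:
--                 is_unique = False
--                 break
--         if is_unique:
--             uniqueCount += 1
--
--     return arr, uniqueCount
-- ===== SOURCE B (Python) =====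
-- def sortAndCountUnique(arr):
--     arr.sort()
--     return arr, len(set(arr))
-- ===== Notes on version B (the rewrite author's own statement) =====
-- stated objective: faster
-- what changed: Replaces the hand-written bubble sort and the O(n^2) nested earlier-occurrence scan by the built-in in-place sort plus a one-shot set cardinality.
-- intended difference: On the empty list A returns ([], 1) because uniqueCount is initialised to 1 before any element is seen, while B returns ([], 0), the intended distinct count of an empty array. — e.g. on sortAndCountUnique([]): A returns ([], 1), B returns ([], 0)
import Mathlib
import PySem

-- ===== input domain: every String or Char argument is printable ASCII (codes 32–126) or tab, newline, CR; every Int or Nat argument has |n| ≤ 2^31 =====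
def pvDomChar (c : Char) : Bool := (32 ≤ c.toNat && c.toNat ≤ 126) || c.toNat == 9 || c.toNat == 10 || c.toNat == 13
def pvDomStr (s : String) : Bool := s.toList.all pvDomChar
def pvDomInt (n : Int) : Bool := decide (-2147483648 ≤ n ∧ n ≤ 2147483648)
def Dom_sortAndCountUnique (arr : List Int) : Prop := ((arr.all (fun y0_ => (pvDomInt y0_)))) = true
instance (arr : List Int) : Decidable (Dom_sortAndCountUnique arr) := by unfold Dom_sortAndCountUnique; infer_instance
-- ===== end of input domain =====

-- B replaces A's bubble sort + O(n^2) earlier-occurrence scan by the built-in sort and a set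
-- cardinality (faster); like A, the Python B sorts its argument in place (same mutation).
-- Intended difference (D_): on the empty list A returns ([], 1) (uniqueCount starts at 1), B returns ([], 0).


-- ===== PORT A =====
-- one swap step of the bubble sort: 'if arr[j] > arr[j+1]: arr[j], arr[j+1] = arr[j+1], arr[j]'
-- (the fallback branch is unreachable: the loop bounds keep j and j+1 in range)
def swapStepA (ys : List Int) (j : Int) : List Int :=
  match PySem.List.pyGet? ys j, PySem.List.pyGet? ys (j + 1) with
  | some a, some b => if a > b then (ys.set j.toNat b).set (j + 1).toNat a else ys
  | _, _ => ys

-- 'for j in range(0, b): …'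
def passA (ys : List Int) (b : Int) : List Int :=
  (PySem.List.pyRange 0 b).foldl swapStepA ys

-- inner 'for j in range(0, i): if arr[i] == arr[j]: is_unique = False; break'
def isUniqLoop (s : List Int) (vi : Option Int) : List Int → Bool
  | [] => true
  | j :: rest => if PySem.List.pyGet? s j = vi then false else isUniqLoop s vi rest

def sortAndCountUnique (arr : List Int) : List Int × Int :=
  let n : Int := arr.length
  let s := (PySem.List.pyRange 0 n).foldl (fun ys i => passA ys (n - i - 1)) arr
  let c := (PySem.List.pyRange 1 n).foldl
    (fun c i => if isUniqLoop s (PySem.List.pyGet? s i) (PySem.List.pyRange 0 i) then c + 1 else c)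
    (1 : Int)
  (s, c)

-- ===== PORT B =====
def sortAndCountUnique_alt (arr : List Int) : List Int × Int :=
  let s := PySem.List.sorted arr id          -- arr.sort()
  (s, ((PySem.Set.ofList s).length : Int))   -- len(set(arr)) (arr is s after the in-place sort)

-- ===== PRECONDITION & SPEC =====
-- On the empty list A returns ([], 1) because uniqueCount is initialised to 1 before any element
-- is seen, while B returns ([], 0), the intended distinct count of an empty array.
def D_sortAndCountUnique (arr : List Int) : Prop := arr = []
instance (arr : List Int) : Decidable (D_sortAndCountUnique arr) := by unfold D_sortAndCountUnique; infer_instance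

def Spec_sortAndCountUnique (arr : List Int) (out : List Int × Int) : Prop :=
  ¬ D_sortAndCountUnique arr → out = sortAndCountUnique_alt arr
instance (arr : List Int) (out : List Int × Int) : Decidable (Spec_sortAndCountUnique arr out) := by
  unfold Spec_sortAndCountUnique; infer_instance

def pvDiffWitness_sortAndCountUnique : List Int := []
def pvDiffWitnessOut_sortAndCountUnique : (List Int × Int) × (List Int × Int) := (([], 1), ([], 0))

-- ===== CLAIM (what is proved, stated in full; the proofs are below) =====
def Claim_unchanged_sortAndCountUnique : Prop :=
  ∀ (arr : List Int), Dom_sortAndCountUnique arr → Spec_sortAndCountUnique arr (sortAndCountUnique arr)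
def Claim_changed_sortAndCountUnique : Prop :=
  Dom_sortAndCountUnique (pvDiffWitness_sortAndCountUnique) ∧
  D_sortAndCountUnique (pvDiffWitness_sortAndCountUnique) ∧
  sortAndCountUnique (pvDiffWitness_sortAndCountUnique) = pvDiffWitnessOut_sortAndCountUnique.1 ∧
  sortAndCountUnique_alt (pvDiffWitness_sortAndCountUnique) = pvDiffWitnessOut_sortAndCountUnique.2 ∧
  pvDiffWitnessOut_sortAndCountUnique.1 ≠ pvDiffWitnessOut_sortAndCountUnique.2
def Claim_exact_sortAndCountUnique : Prop :=
  ∀ (arr : List Int), Dom_sortAndCountUnique arr → D_sortAndCountUnique arr →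
    sortAndCountUnique arr ≠ sortAndCountUnique_alt arr

-- ===== LEMMAS AND PROOFS =====

-- Nat-indexed version of one swap step
def swapStep (ys : List Int) (j : Nat) : List Int :=
  match ys[j]?, ys[j + 1]? with
  | some a, some b => if a > b then (ys.set j b).set (j + 1) a else ys
  | _, _ => ys

-- structural form of one (truncated) bubble pass: swaps at positions 0..m-1
def tpass : Nat → List Int → List Int
  | _, [] => []
  | 0, ys => ys
  | _ + 1, [a] => [a]
  | m + 1, a :: b :: t => if a > b then b :: tpass m (a :: t) else a :: tpass m (b :: t)

-- iterated passes with shrinking bound: tpass (m-1), tpass (m-2), …, tpass 0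
def sweep : Nat → List Int → List Int
  | 0, l => l
  | m + 1, l => sweep m (tpass m l)

lemma swapStepA_natCast (ys : List Int) (j : Nat) : swapStepA ys (j : Int) = swapStep ys j := by
  have h : ((j : Int) + 1) = ((j + 1 : Nat) : Int) := by push_cast; ring
  simp only [swapStepA, swapStep, h, PySem.List.pyGet?_natCast, Int.toNat_natCast]

lemma swapStep_nil (j : Nat) : swapStep [] j = [] := by
  simp [swapStep]

lemma swapStep_cons (c : Int) (t : List Int) (j : Nat) :
    swapStep (c :: t) (j + 1) = c :: swapStep t j := by
  unfold swapStep
  simp only [List.getElem?_cons_succ]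
  cases t[j]? <;> cases t[j + 1]? <;> simp [List.set_cons_succ]
  split_ifs <;> simp

lemma foldl_swapStep_nil (l : List Nat) : l.foldl swapStep [] = [] := by
  induction l with
  | nil => rfl
  | cons j rest ih => simp [List.foldl_cons, swapStep_nil, ih]

lemma foldl_swapStep_shift (m s : Nat) (c : Int) (t : List Int) :
    (List.range' (s + 1) m).foldl swapStep (c :: t) = c :: (List.range' s m).foldl swapStep t := by
  induction m generalizing s c t with
  | zero => rfl
  | succ m ih =>
    rw [List.range'_succ, List.range'_succ, List.foldl_cons, List.foldl_cons, swapStep_cons]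
    exact ih (s + 1) c (swapStep t s)

lemma foldl_range_swapStep (m : Nat) (ys : List Int) :
    (List.range m).foldl swapStep ys = tpass m ys := by
  induction m generalizing ys with
  | zero => cases ys <;> rfl
  | succ m ih =>
    have hr : List.range (m + 1) = 0 :: List.range' 1 m := by
      rw [List.range_eq_range', List.range'_succ]
    rw [hr, List.foldl_cons]
    match ys with
    | [] => rw [swapStep_nil, foldl_swapStep_nil]; rfl
    | [a] =>
      have h0 : swapStep [a] 0 = [a] := by simp [swapStep]
      rw [h0, show (1 : Nat) = 0 + 1 from rfl, foldl_swapStep_shift, foldl_swapStep_nil]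
      rfl
    | a :: b :: t =>
      have h0 : swapStep (a :: b :: t) 0 = if a > b then b :: a :: t else a :: b :: t := by
        simp [swapStep]
      by_cases h : a > b
      · rw [h0, if_pos h, show (1 : Nat) = 0 + 1 from rfl, foldl_swapStep_shift,
          ← List.range_eq_range', ih]
        simp [tpass, h]
      · rw [h0, if_neg h, show (1 : Nat) = 0 + 1 from rfl, foldl_swapStep_shift,
          ← List.range_eq_range', ih]
        simp [tpass, h]

lemma passA_eq_tpass (ys : List Int) (m : Nat) : passA ys (m : Int) = tpass m ys := by
  unfold passA
  rw [PySem.List.pyRange_zero_natCast, List.foldl_map]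
  simp only [swapStepA_natCast]
  exact foldl_range_swapStep m ys

lemma tpass_perm (m : Nat) (l : List Int) : (tpass m l).Perm l := by
  induction m generalizing l with
  | zero => cases l <;> simp [tpass]
  | succ m ih =>
    match l with
    | [] => simp [tpass]
    | [a] => simp [tpass]
    | a :: b :: t =>
      by_cases h : a > b
      · simp only [tpass, if_pos h]
        exact ((ih (a :: t)).cons b).trans (List.Perm.swap a b t)
      · simp only [tpass, if_neg h]
        exact (ih (b :: t)).cons a

lemma sweep_perm (m : Nat) (l : List Int) : (sweep m l).Perm l := by
  induction m generalizing l with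
  | zero => simp [sweep]
  | succ m ih => exact (ih (tpass m l)).trans (tpass_perm m l)

lemma tpass_spec (m : Nat) (l : List Int)
    (h1 : List.Pairwise (· ≤ ·) (l.drop (m + 1)))
    (h2 : ∀ x ∈ l.take (m + 1), ∀ y ∈ l.drop (m + 1), x ≤ y) :
    List.Pairwise (· ≤ ·) ((tpass m l).drop m) ∧
    (∀ x ∈ l.take (m + 1), ∀ y ∈ (tpass m l).drop m, x ≤ y) ∧
    (∀ x ∈ (tpass m l).take m, ∀ y ∈ (tpass m l).drop m, x ≤ y) := by
  induction m generalizing l with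
  | zero =>
    cases l with
    | nil => simp [tpass]
    | cons a t =>
      simp only [tpass, List.drop_zero, List.take_zero, List.take_succ_cons, List.take_zero,
        List.drop_succ_cons, List.drop_zero] at h1 h2 ⊢
      refine ⟨?_, ?_, by simp⟩
      · exact List.pairwise_cons.mpr ⟨fun y hy => h2 a (by simp) y hy, h1⟩
      · intro x hx y hy
        simp only [List.mem_singleton] at hx
        subst hx
        rcases List.mem_cons.mp hy with rfl | hy
        · exact le_refl _
        · exact h2 x (by simp) y hy
  | succ m ih =>
    match l with
    | [] => simp [tpass]
    | [a] =>
      simp only [tpass]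
      refine ⟨?_, ?_, ?_⟩
      · simp [List.drop_succ_cons]
      · intro x hx y hy; simp [List.drop_succ_cons] at hy
      · intro x hx y hy; simp [List.drop_succ_cons] at hy
    | a :: b :: t =>
      simp only [List.drop_succ_cons, List.take_succ_cons] at h1 h2
      by_cases h : a > b
      · have hba : b ≤ a := le_of_lt h
        have h1' : List.Pairwise (· ≤ ·) ((a :: t).drop (m + 1)) := by
          simpa [List.drop_succ_cons] using h1
        have h2' : ∀ x ∈ (a :: t).take (m + 1), ∀ y ∈ (a :: t).drop (m + 1), x ≤ y := by
          intro x hx y hy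
          simp only [List.take_succ_cons, List.mem_cons] at hx
          simp only [List.drop_succ_cons] at hy
          rcases hx with rfl | hx
          · exact h2 x (by simp) y hy
          · exact h2 x (by simp [hx]) y hy
        obtain ⟨c1, c2, c3⟩ := ih (a :: t) h1' h2'
        have key : ∀ y ∈ (tpass m (a :: t)).drop m, b ≤ y := by
          intro y hy
          exact hba.trans (c2 a (by simp) y hy)
        simp only [tpass, if_pos h, List.drop_succ_cons, List.take_succ_cons]
        refine ⟨c1, ?_, ?_⟩
        · intro x hx y hy
          simp only [List.mem_cons] at hx
          rcases hx with rfl | rfl | hx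
          · exact c2 x (by simp) y hy
          · exact key y hy
          · exact c2 x (by simp [hx]) y hy
        · intro x hx y hy
          rcases List.mem_cons.mp hx with rfl | hx
          · exact key y hy
          · exact c3 x hx y hy
      · have hab : a ≤ b := le_of_not_gt h
        have h1' : List.Pairwise (· ≤ ·) ((b :: t).drop (m + 1)) := by
          simpa [List.drop_succ_cons] using h1
        have h2' : ∀ x ∈ (b :: t).take (m + 1), ∀ y ∈ (b :: t).drop (m + 1), x ≤ y := by
          intro x hx y hy
          simp only [List.take_succ_cons, List.mem_cons] at hx
          simp only [List.drop_succ_cons] at hy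
          rcases hx with rfl | hx
          · exact h2 x (by simp) y hy
          · exact h2 x (by simp [hx]) y hy
        obtain ⟨c1, c2, c3⟩ := ih (b :: t) h1' h2'
        have key : ∀ y ∈ (tpass m (b :: t)).drop m, a ≤ y := by
          intro y hy
          exact hab.trans (c2 b (by simp) y hy)
        simp only [tpass, if_neg h, List.drop_succ_cons, List.take_succ_cons]
        refine ⟨c1, ?_, ?_⟩
        · intro x hx y hy
          simp only [List.mem_cons] at hx
          rcases hx with rfl | rfl | hx
          · exact key y hy
          · exact c2 x (by simp) y hy
          · exact c2 x (by simp [hx]) y hy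
        · intro x hx y hy
          rcases List.mem_cons.mp hx with rfl | hx
          · exact key y hy
          · exact c3 x hx y hy

lemma sweep_sorted_aux (m : Nat) (l : List Int)
    (h1 : List.Pairwise (· ≤ ·) (l.drop m))
    (h2 : ∀ x ∈ l.take m, ∀ y ∈ l.drop m, x ≤ y) :
    List.Pairwise (· ≤ ·) (sweep m l) := by
  induction m generalizing l with
  | zero => simpa using h1
  | succ m ih =>
    obtain ⟨c1, _, c3⟩ := tpass_spec m l h1 h2
    exact ih (tpass m l) c1 c3

lemma sweep_sorted (l : List Int) : List.Pairwise (· ≤ ·) (sweep l.length l) := by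
  refine sweep_sorted_aux l.length l ?_ ?_
  · simp [List.drop_length]
  · intro x hx y hy
    simp [List.drop_length] at hy

lemma foldl_tpass_eq_sweep (n : Nat) (l : List Int) :
    (List.range n).foldl (fun ys k => tpass (n - 1 - k) ys) l = sweep n l := by
  induction n generalizing l with
  | zero => rfl
  | succ n ih =>
    rw [List.range_succ_eq_map, List.foldl_cons, List.foldl_map]
    have hf : ∀ (ys : List Int) (k : Nat), tpass (n + 1 - 1 - (k + 1)) ys = tpass (n - 1 - k) ys := by
      intro ys k; congr 1; omega
    have h0 : n + 1 - 1 - 0 = n := by omega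
    rw [h0]
    simp only [Nat.succ_eq_add_one, hf]
    exact ih (tpass n l)

-- A's sorting phase equals sweep
lemma sortA_eq_sweep (arr : List Int) :
    (PySem.List.pyRange 0 (arr.length : Int)).foldl
      (fun ys i => passA ys ((arr.length : Int) - i - 1)) arr = sweep arr.length arr := by
  rw [PySem.List.pyRange_zero_natCast, List.foldl_map]
  rw [PySem.List.foldl_congr_mem _ _ (fun ys k => tpass (arr.length - 1 - k) ys) arr ?_]
  · exact foldl_tpass_eq_sweep arr.length arr
  · intro ys k hk
    simp only [List.mem_range] at hk
    have hc : ((arr.length : Int) - (k : Int) - 1) = ((arr.length - 1 - k : Nat) : Int) := by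
      omega
    rw [hc, passA_eq_tpass]

-- B's sort equals A's sorting phase
lemma sortedB_eq_sweep (arr : List Int) : PySem.List.sorted arr id = sweep arr.length arr := by
  refine List.Perm.eq_of_pairwise (le := (· ≤ ·)) (fun a b _ _ h1 h2 => le_antisymm h1 h2) ?_ ?_ ?_
  · simpa using PySem.List.sorted_pairwise arr id
  · exact sweep_sorted arr
  · exact (PySem.List.sorted_perm arr id false).trans (sweep_perm arr.length arr).symm

lemma isUniqLoop_iff (s : List Int) (vi : Option Int) (js : List Int) :
    isUniqLoop s vi js = true ↔ ∀ j ∈ js, PySem.List.pyGet? s j ≠ vi := by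
  induction js with
  | nil => simp [isUniqLoop]
  | cons j rest ih =>
    by_cases h : PySem.List.pyGet? s j = vi <;> simp [isUniqLoop, h, ih]

-- number of first occurrences = number of distinct values
lemma countP_firstOcc (s : List Int) :
    (List.range s.length).countP (fun k => decide (s[k]?.getD 0 ∉ s.take k)) = s.toFinset.card := by
  induction s using List.reverseRecOn with
  | nil => simp
  | append_singleton s x ih =>
    rw [List.length_append, List.length_singleton, List.range_succ, List.countP_append]
    have h1 : (List.range s.length).countP
        (fun k => decide ((s ++ [x])[k]?.getD 0 ∉ (s ++ [x]).take k)) =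
        (List.range s.length).countP (fun k => decide (s[k]?.getD 0 ∉ s.take k)) := by
      refine List.countP_congr ?_
      intro k hk
      simp only [List.mem_range] at hk
      rw [List.getElem?_append_left hk, List.take_append_of_le_length (le_of_lt hk)]
    have h2 : ([s.length].countP
        (fun k => decide ((s ++ [x])[k]?.getD 0 ∉ (s ++ [x]).take k))) =
        if x ∈ s then 0 else 1 := by
      have ht : (s ++ [x]).take s.length = s := by
        rw [List.take_append_of_le_length (le_refl _), List.take_length]
      simp only [List.countP_cons, List.countP_nil, List.getElem?_concat_length, ht,
        Option.getD_some]
      by_cases hx : x ∈ s <;> simp [hx]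
    rw [h1, h2, ih]
    have hcard : (s ++ [x]).toFinset.card = s.toFinset.card + if x ∈ s then 0 else 1 := by
      rw [List.toFinset_append]
      by_cases hx : x ∈ s
      · have : ([x] : List Int).toFinset ⊆ s.toFinset := by
          simp [List.mem_toFinset, hx, Finset.subset_iff]
        rw [Finset.union_eq_left.mpr this]
        simp [hx]
      · have : s.toFinset ∪ ([x] : List Int).toFinset = insert x s.toFinset := by
          simp
        rw [this, Finset.card_insert_of_notMem (by simp [List.mem_toFinset, hx])]
        simp [hx]
    omega

-- the inner break-loop decides 'this element has no earlier equal'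
lemma isUniq_eq_decide (s : List Int) (i : Nat) (hi : i < s.length) :
    isUniqLoop s (PySem.List.pyGet? s (i : Int)) (PySem.List.pyRange 0 (i : Int)) =
      decide (s[i]?.getD 0 ∉ s.take i) := by
  rw [PySem.List.pyGet?_natCast, PySem.List.pyRange_zero_natCast, List.getElem?_eq_getElem hi]
  simp only [Option.getD_some]
  rw [Bool.eq_iff_iff, decide_eq_true_eq, isUniqLoop_iff]
  constructor
  · intro h hmem
    obtain ⟨j, hj, hval⟩ := List.mem_take_iff_getElem.mp hmem
    refine h (j : Int) ?_ ?_
    · exact List.mem_map.mpr ⟨j, List.mem_range.mpr (lt_of_lt_of_le hj (min_le_left _ _)), rfl⟩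
    · rw [PySem.List.pyGet?_natCast, List.getElem?_eq_getElem (lt_of_lt_of_le hj (min_le_right _ _))]
      exact congrArg some hval
  · intro hnot j hjmem heq
    obtain ⟨k, hk, rfl⟩ := List.mem_map.mp hjmem
    rw [List.mem_range] at hk
    have hkl : k < s.length := lt_trans hk hi
    rw [PySem.List.pyGet?_natCast, List.getElem?_eq_getElem hkl, Option.some_inj] at heq
    exact hnot (List.mem_take_iff_getElem.mpr ⟨k, lt_min hk hkl, heq⟩)

-- A's counting phase computes the number of distinct values (for a nonempty list)
lemma countA_eq_card (s : List Int) (hs : s ≠ []) :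
    (PySem.List.pyRange 1 (s.length : Int)).foldl
      (fun c i => if isUniqLoop s (PySem.List.pyGet? s i) (PySem.List.pyRange 0 i) then c + 1 else c)
      (1 : Int) = (s.toFinset.card : Int) := by
  obtain ⟨a, t, hs'⟩ : ∃ a t, s = a :: t := by
    cases s with
    | nil => exact absurd rfl hs
    | cons a t => exact ⟨a, t, rfl⟩
  have hlen : s.length = t.length + 1 := by rw [hs']; rfl
  have hmap : PySem.List.pyRange 0 (s.length : Int) =
      (0 : Int) :: List.map (fun k => ((k + 1 : Nat) : Int)) (List.range t.length) := by
    rw [PySem.List.pyRange_zero_natCast, hlen, List.range_succ_eq_map, List.map_cons,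
      List.map_map]
    rfl
  have hcons : PySem.List.pyRange 0 (s.length : Int) =
      (0 : Int) :: PySem.List.pyRange 1 (s.length : Int) := by
    have : (0 : Int) < (s.length : Int) := by rw [hlen]; push_cast; omega
    exact PySem.List.pyRange_one_cons this
  have hone : PySem.List.pyRange 1 (s.length : Int) =
      List.map (fun k => ((k + 1 : Nat) : Int)) (List.range t.length) :=
    (List.cons.injEq _ _ _ _).mp (hcons.symm.trans hmap) |>.2
  set P : Nat → Bool := fun k => decide (s[k]?.getD 0 ∉ s.take k) with hP
  have hcong : ∀ k ∈ List.range t.length,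
      (isUniqLoop s (PySem.List.pyGet? s ((k + 1 : Nat) : Int))
        (PySem.List.pyRange 0 ((k + 1 : Nat) : Int)) = true) ↔ (P (k + 1) = true) := by
    intro k hk
    rw [List.mem_range] at hk
    rw [isUniq_eq_decide s (k + 1) (by omega)]
  rw [hone, List.foldl_map, PySem.List.foldl_count_if
    (fun k => isUniqLoop s (PySem.List.pyGet? s ((k + 1 : Nat) : Int))
      (PySem.List.pyRange 0 ((k + 1 : Nat) : Int))) (List.range t.length) 1,
    List.countP_congr hcong]
  have hcard : s.toFinset.card = (List.range t.length).countP (fun k => P (k + 1)) + 1 := by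
    rw [← countP_firstOcc s, hlen, List.range_succ_eq_map, List.countP_cons, List.countP_map]
    simp only [← hP]
    rfl
  rw [hcard]
  push_cast
  ring

lemma setLen_eq_card (s : List Int) : (PySem.Set.ofList s).length = s.toFinset.card := by
  have h1 : (PySem.Set.ofList s).toFinset = s.toFinset := by
    refine Finset.ext (fun a => ?_)
    simp [List.mem_toFinset, PySem.Set.mem_ofList]
  rw [← h1, List.toFinset_card_of_nodup (PySem.Set.nodup_ofList s)]

-- ===== VERDICT (by name: the statement is the Claim_ definition above) =====
theorem sortAndCountUnique_spec : Claim_unchanged_sortAndCountUnique := by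
  intro arr _
  unfold Spec_sortAndCountUnique D_sortAndCountUnique
  intro hne
  simp only [sortAndCountUnique, sortAndCountUnique_alt]
  rw [sortA_eq_sweep, sortedB_eq_sweep]
  set S := sweep arr.length arr with hS
  have hl : S.length = arr.length := (sweep_perm _ _).length_eq
  have hnil : S ≠ [] := by
    intro h
    apply hne
    have h0 : arr.length = 0 := by rw [← hl, h]; rfl
    exact List.eq_nil_of_length_eq_zero h0
  refine Prod.ext rfl ?_
  show _ = ((PySem.Set.ofList S).length : Int)
  rw [show ((arr.length : Int)) = ((S.length : Int)) by rw [hl], countA_eq_card S hnil,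
    setLen_eq_card]

theorem sortAndCountUnique_changed : Claim_changed_sortAndCountUnique := by
  unfold Claim_changed_sortAndCountUnique; decide

theorem sortAndCountUnique_tight : Claim_exact_sortAndCountUnique := by
  intro arr _ hD
  simp only [D_sortAndCountUnique] at hD
  subst hD
  decide
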